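-- pv_equiv track=rewrite | github.com/ae-gorithm/lucy | aegorithm/week8/4779.py | dfs
-- ===== SOURCE A (Python) =====
-- def dfs(array, depth):
--     if depth == 0:
--         return array
--
--     length = len(array) // 3
--
--     part1 = dfs(array[0:length], depth - 1)
--     part2 = [" "] * length
--     part3 = dfs(array[length*2:], depth - 1)
--
--     return part1+part2+part3
-- ===== SOURCE B (Python) =====
-- def dfs(array, depth):
--     if depth == 0:
--         return array
--     result = []
--     for i in range(len(array)):
--         lo, hi, d = 0, len(array), depth
--         blank = False
--         while d > 0:
--             length = (hi - lo) // 3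
--             if lo + length <= i < lo + 2 * length:
--                 blank = True
--                 break
--             if i < lo + length:
--                 hi = lo + length
--             else:
--                 lo = lo + 2 * length
--             d -= 1
--         result.append(" " if blank else array[i])
--     return result
-- ===== Notes on version B (the rewrite author's own statement) =====
-- stated objective: alternative
-- what changed: Replaces the recursive split-and-concatenate (slicing and rebuilding sublists) by a single pass over indices that decides each position independently by walking a [lo,hi) window down the Cantor split.
import Mathlib
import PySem

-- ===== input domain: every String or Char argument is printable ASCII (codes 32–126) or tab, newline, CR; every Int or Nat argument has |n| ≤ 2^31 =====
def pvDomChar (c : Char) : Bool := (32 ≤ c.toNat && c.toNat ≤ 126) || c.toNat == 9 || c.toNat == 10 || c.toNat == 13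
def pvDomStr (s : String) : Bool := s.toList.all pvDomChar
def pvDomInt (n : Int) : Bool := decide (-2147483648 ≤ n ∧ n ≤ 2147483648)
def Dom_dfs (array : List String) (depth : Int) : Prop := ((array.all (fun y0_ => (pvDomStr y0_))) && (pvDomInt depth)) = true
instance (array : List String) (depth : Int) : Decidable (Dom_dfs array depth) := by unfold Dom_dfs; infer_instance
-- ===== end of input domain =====

-- B is an alternative of the same cost: one pass over indices with a window walk instead of recursive slicing.
-- Equivalence is claimed for depth ≥ 0; for depth < 0 the Python A never returns (RecursionError).

-- ===== PORT A =====
-- A recurses on depth; that recursion only terminates for depth ≥ 0, so the recursion runs on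
-- depth.toNat (a pure totality device: for depth ≥ 0 it is exactly A's recursion; depth < 0 is outside Pre_dfs).
-- array[0:length] = take length and array[length*2:] = drop (length*2) are exact here (nonnegative bounds);
-- len(array) // 3 on a Nat length is Nat division, exactly Python's //.
def dfsA (array : List String) : Nat → List String
  | 0 => array
  | d + 1 =>
    dfsA (array.take (array.length / 3)) d
      ++ List.replicate (array.length / 3) " "
      ++ dfsA (array.drop (array.length / 3 * 2)) d

def dfs (array : List String) (depth : Int) : List String := dfsA array depth.toNat

-- ===== PORT B =====
-- the inner while-loop of B: walks the window [lo,hi) inward, at most d iterations (d decreases each turn,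
-- so recursion on the Nat value of d is exactly the loop); (hi-lo)//3 on Nats is Python's //.
def probeB (i : Nat) : Nat → Nat → Nat → Bool
  | _,  _,  0 => false
  | lo, hi, d + 1 =>
    if lo + (hi - lo) / 3 ≤ i ∧ i < lo + 2 * ((hi - lo) / 3) then true
    else if i < lo + (hi - lo) / 3 then probeB i lo (lo + (hi - lo) / 3) d
    else probeB i (lo + 2 * ((hi - lo) / 3)) hi d

def dfs_alt (array : List String) (depth : Int) : List String :=
  if depth == 0 then array
  else (List.range array.length).map
    (fun i => if probeB i 0 array.length depth.toNat then " " else array.getD i "")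

-- ===== PRECONDITION & SPEC =====
-- Pre_ excludes depth < 0, on which A never returns (RecursionError): the recursion never reaches depth == 0.
def Pre_dfs (array : List String) (depth : Int) : Prop := 0 ≤ depth
instance (array : List String) (depth : Int) : Decidable (Pre_dfs array depth) := by unfold Pre_dfs; infer_instance
def pvWitness_dfs : List String × Int := (["a", "b", "c", "d", "e", "f"], 1)

def Spec_dfs (array : List String) (depth : Int) (out : List String) : Prop := out = dfs_alt array depth
instance (array : List String) (depth : Int) (out : List String) : Decidable (Spec_dfs array depth out) := by unfold Spec_dfs; infer_instance

-- ===== CLAIM (what is proved, stated in full; the proofs are below) =====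
def Claim_equal_dfs : Prop := ∀ (array : List String) (depth : Int), Dom_dfs array depth → Pre_dfs array depth → Spec_dfs array depth (dfs array depth)

-- ===== LEMMAS AND PROOFS =====

lemma getD_take (l : List String) (k i : Nat) (h : i < k) (h2 : i < l.length) :
    (l.take k).getD i "" = l.getD i "" := by
  rw [List.getD_eq_getElem _ _ (by simp only [List.length_take]; omega),
      List.getD_eq_getElem _ _ h2]
  simp

lemma getD_drop (l : List String) (k i : Nat) (h : k + i < l.length) :
    (l.drop k).getD i "" = l.getD (k + i) "" := by
  rw [List.getD_eq_getElem _ _ (by simp only [List.length_drop]; omega),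
      List.getD_eq_getElem _ _ h]
  simp

lemma dfsA_length (d : Nat) : ∀ (array : List String), (dfsA array d).length = array.length := by
  induction d with
  | zero => intro array; simp [dfsA]
  | succ d ih =>
    intro array
    simp only [dfsA, List.length_append, List.length_replicate, ih,
      List.length_take, List.length_drop]
    have := Nat.div_mul_le_self array.length 3
    omega

lemma probeB_shift (d : Nat) : ∀ (i lo n : Nat),
    probeB (lo + i) lo (lo + n) d = probeB i 0 n d := by
  induction d with
  | zero => intro i lo n; rfl
  | succ d ih =>
    intro i lo n
    simp only [probeB, Nat.add_sub_cancel_left, Nat.sub_zero, Nat.zero_add,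
      Nat.add_le_add_iff_left, Nat.add_lt_add_iff_left]
    by_cases hmid : n / 3 ≤ i ∧ i < 2 * (n / 3)
    · rw [if_pos hmid, if_pos hmid]
    · rw [if_neg hmid, if_neg hmid]
      by_cases hlt : i < n / 3
      · rw [if_pos hlt, if_pos hlt]
        exact ih i lo (n / 3)
      · rw [if_neg hlt, if_neg hlt]
        have h3 : n / 3 * 3 ≤ n := Nat.div_mul_le_self n 3
        have hk : 2 * (n / 3) ≤ i := by omega
        have hkn : 2 * (n / 3) ≤ n := by omega
        generalize hq : n / 3 = q at hk hkn ⊢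
        obtain ⟨j, hj⟩ : ∃ j, i = 2 * q + j := ⟨i - 2 * q, by omega⟩
        subst hj
        obtain ⟨m, hm⟩ : ∃ m, n = 2 * q + m := ⟨n - 2 * q, by omega⟩
        subst hm
        rw [show lo + (2 * q + j) = lo + 2 * q + j from by omega,
            show lo + (2 * q + m) = lo + 2 * q + m from by omega,
            ih j (lo + 2 * q) m, ih j (2 * q) m]

lemma dfsA_getD (d : Nat) : ∀ (array : List String) (i : Nat), i < array.length →
    (dfsA array d).getD i "" =
      if probeB i 0 array.length d then " " else array.getD i "" := by
  induction d with
  | zero => intro array i _; simp [dfsA, probeB]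
  | succ d ih =>
    intro array i hi
    have h3 : array.length / 3 * 3 ≤ array.length := Nat.div_mul_le_self _ 3
    simp only [dfsA, probeB, Nat.sub_zero, Nat.zero_add]
    generalize hq : array.length / 3 = q at h3 ⊢
    have hlen1 : (dfsA (array.take q) d).length = q := by
      rw [dfsA_length]; simp only [List.length_take]; omega
    by_cases hmid : q ≤ i ∧ i < 2 * q
    · rw [if_pos hmid, if_pos rfl]
      rw [List.getD_append _ _ _ _
            (by simp only [List.length_append, hlen1, List.length_replicate]; omega)]
      rw [List.getD_append_right _ _ _ _ (by rw [hlen1]; omega)]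
      rw [hlen1]
      exact List.getD_replicate " " (by omega)
    · rw [if_neg hmid]
      by_cases hlt : i < q
      · rw [if_pos hlt]
        rw [List.getD_append _ _ _ _
              (by simp only [List.length_append, hlen1, List.length_replicate]; omega)]
        rw [List.getD_append _ _ _ _ (by rw [hlen1]; omega)]
        rw [ih (array.take q) i (by simp only [List.length_take]; omega)]
        rw [show (array.take q).length = q from by simp only [List.length_take]; omega]
        rw [getD_take array q i hlt (by omega)]
      · rw [if_neg hlt]
        have hge : 2 * q ≤ i := by omega
        rw [List.getD_append_right _ _ _ _
              (by simp only [List.length_append, hlen1, List.length_replicate]; omega)]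
        simp only [List.length_append, hlen1, List.length_replicate]
        rw [ih (array.drop (q * 2)) (i - (q + q)) (by simp only [List.length_drop]; omega)]
        rw [show (array.drop (q * 2)).length = array.length - q * 2 from by
              simp only [List.length_drop]]
        rw [getD_drop array (q * 2) (i - (q + q)) (by omega)]
        rw [show q * 2 + (i - (q + q)) = i from by omega]
        have hsh : ∀ (N : Nat), 2 * q ≤ N →
            probeB i (2 * q) N d = probeB (i - (q + q)) 0 (N - q * 2) d := by
          intro N hN
          obtain ⟨j, hj⟩ : ∃ j, i = 2 * q + j := ⟨i - 2 * q, by omega⟩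
          obtain ⟨m, hm⟩ : ∃ m, N = 2 * q + m := ⟨N - 2 * q, by omega⟩
          rw [hj, hm]
          rw [show 2 * q + j - (q + q) = j from by omega,
              show 2 * q + m - q * 2 = m from by omega]
          exact probeB_shift d j (2 * q) m
        rw [hsh array.length (by omega)]

lemma dfsA_eq_alt (array : List String) (d : Nat) :
    dfsA array d = (List.range array.length).map
      (fun i => if probeB i 0 array.length d then " " else array.getD i "") := by
  apply List.ext_getElem
  · simp [dfsA_length]
  · intro i h1 h2
    have hi : i < array.length := by simpa [dfsA_length] using h1
    have h := dfsA_getD d array i hi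
    rw [List.getD_eq_getElem _ _ h1] at h
    rw [h]
    simp

-- ===== VERDICT (by name: the statement is the Claim_ definition above) =====
theorem dfs_spec : Claim_equal_dfs := by
  intro array depth _ _
  unfold Spec_dfs dfs dfs_alt
  by_cases h0 : depth = 0
  · simp [h0, dfsA]
  · rw [if_neg (by simp [h0])]
    exact dfsA_eq_alt array depth.toNat
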